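-- pv_equiv track=rewrite | github.com/millcrest/python-dev-test | remove_duplicates_and_sum.py | remove_duplicates_and_add_sum
-- ===== SOURCE A (Python) =====
-- def remove_duplicates_and_add_sum(items):
--     # Create an empty dictionary to store items and their counts
--     items_dict = {}
--     for item in items:
--         # Increase the count for each item in the dictionary
--         if item in items_dict:
--             items_dict[item] += 1
--         else:
--             items_dict[item] = 1
--
--     new_list = []
--     total_sum = 0
--     for item, count in items_dict.items():
--         # If the item's count is 1, add it to the new list and the total sum
--         if count == 1:
--             new_list.append(item)
--             total_sum += item
--
--     # Return the new list and the total sum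
--     return new_list, total_sum
-- ===== SOURCE B (Python) =====
-- def remove_duplicates_and_add_sum(items):
--     # Single pass: keep items seen exactly once (in first-occurrence order)
--     # in an ordered dict; items seen twice or more go to a set.
--     seen_once = {}
--     seen_more = set()
--     for item in items:
--         if item in seen_more:
--             continue
--         if item in seen_once:
--             del seen_once[item]
--             seen_more.add(item)
--         else:
--             seen_once[item] = None
--     new_list = list(seen_once)
--     return new_list, sum(new_list)
-- ===== Notes on version B (the rewrite author's own statement) =====
-- stated objective: alternative
-- what changed: Replaces A's two phases (build a full count dictionary, then re-scan all its items) by a single pass that maintains an order-preserving dict of items seen exactly once and a set of items seen more than once, so no counts are stored and no second scan over the dictionary is needed.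
import Mathlib
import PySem

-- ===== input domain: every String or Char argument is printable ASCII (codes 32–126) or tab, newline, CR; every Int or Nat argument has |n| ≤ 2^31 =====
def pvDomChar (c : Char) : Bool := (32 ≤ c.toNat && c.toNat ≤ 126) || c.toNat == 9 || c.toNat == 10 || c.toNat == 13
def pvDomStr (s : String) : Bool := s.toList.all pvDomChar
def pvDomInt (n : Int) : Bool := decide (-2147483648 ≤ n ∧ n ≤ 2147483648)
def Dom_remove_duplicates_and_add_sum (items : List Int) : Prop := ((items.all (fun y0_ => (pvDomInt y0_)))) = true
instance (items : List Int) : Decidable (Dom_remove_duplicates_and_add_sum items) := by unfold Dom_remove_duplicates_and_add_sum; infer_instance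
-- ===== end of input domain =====

-- B replaces A's count-dictionary + second scan by a single pass keeping a dict of
-- once-seen items and a set of repeated items (same O(n) cost, different algorithm).


-- ===== PORT A =====
def remove_duplicates_and_add_sum (items : List Int) : List Int × Int :=
  let items_dict : PySem.Dict Int Int :=
    items.foldl (fun d item =>
      if d.contains item then d.insert item (d.getD item 0 + 1)
      else d.insert item 1) PySem.Dict.empty
  items_dict.items.foldl (fun acc kc =>
    if kc.2 == 1 then (acc.1 ++ [kc.1], acc.2 + kc.1) else acc)
    (([] : List Int), (0 : Int))

-- ===== PORT B =====
def remove_duplicates_and_add_sum_alt (items : List Int) : List Int × Int :=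
  let st :=
    items.foldl (fun st item =>
      if PySem.Set.contains st.2 item then st
      else if st.1.contains item then (st.1.erase item, PySem.Set.add st.2 item)
      else (st.1.insert item (), st.2))
      ((PySem.Dict.empty : PySem.Dict Int Unit), (PySem.Set.empty : PySem.Set Int))
  let new_list := st.1.keys
  (new_list, new_list.sum)

-- ===== PRECONDITION & SPEC =====
def Spec_remove_duplicates_and_add_sum (items : List Int) (out : List Int × Int) : Prop := out = remove_duplicates_and_add_sum_alt items
instance (items : List Int) (out : List Int × Int) : Decidable (Spec_remove_duplicates_and_add_sum items out) := by unfold Spec_remove_duplicates_and_add_sum; infer_instance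

-- ===== CLAIM (what is proved, stated in full; the proofs are below) =====
def Claim_equal_remove_duplicates_and_add_sum : Prop := ∀ (items : List Int), Dom_remove_duplicates_and_add_sum items → Spec_remove_duplicates_and_add_sum items (remove_duplicates_and_add_sum items)

-- ===== LEMMAS AND PROOFS =====

-- A's first loop builds exactly Counter(items).
lemma pvA_dict_eq_counter (items : List Int) :
    items.foldl (fun (d : PySem.Dict Int Int) item =>
      if d.contains item then d.insert item (d.getD item 0 + 1)
      else d.insert item 1) PySem.Dict.empty = PySem.Dict.counter items := by
  have hf : (fun (d : PySem.Dict Int Int) item =>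
      if d.contains item then d.insert item (d.getD item 0 + 1)
      else d.insert item 1)
      = fun d item => d.insert item (d.getD item 0 + 1) := by
    funext d item
    by_cases h : d.contains item = true
    · simp [h]
    · simp only [Bool.not_eq_true] at h
      simp [h, PySem.Dict.getD_of_not_contains d 0 h]
  rw [hf, PySem.Dict.foldl_insert_getD_add_one_eq_counter]

-- Shape of A's second loop: it appends the keys with count 1 and sums them.
lemma pvA_collect (ps : List (Int × Int)) (acc : List Int) (s : Int) :
    ps.foldl (fun acc kc =>
      if kc.2 == 1 then (acc.1 ++ [kc.1], acc.2 + kc.1) else acc) (acc, s)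
    = (acc ++ (ps.filter (fun kc => kc.2 == 1)).map (·.1),
       s + ((ps.filter (fun kc => kc.2 == 1)).map (·.1)).sum) := by
  induction ps generalizing acc s with
  | nil => simp
  | cons p t ih =>
    rw [List.foldl_cons]
    by_cases h : p.2 = 1
    · have hb : (p.2 == 1) = true := by simp [h]
      rw [hb]
      simp only [if_true]
      rw [ih]
      simp [hb, add_assoc]
    · have hb : (p.2 == 1) = false := by simp [h]
      rw [hb]
      simp only [Bool.false_eq_true, if_false]
      rw [ih]
      simp [hb]

lemma pv_keys_erase (d : PySem.Dict Int Unit) (k : Int) :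
    (d.erase k).keys = d.keys.filter (fun y => !(y == k)) := by
  simp [PySem.Dict.erase, PySem.Dict.keys, List.filter_map]
  rfl

lemma pv_count_app_ne (l : List Int) {k x : Int} (h : k ≠ x) :
    List.count k (l ++ [x]) = List.count k l := by
  rw [List.count_append, List.count_eq_zero.mpr (by simp [h] : k ∉ [x])]
  omega

lemma pv_count_app_self (l : List Int) (x : Int) :
    List.count x (l ++ [x]) = List.count x l + 1 := by
  rw [List.count_append]
  simp

lemma pv_beq_one_congr {a b : Nat} (h : a = 1 ↔ b = 1) : (a == 1) = (b == 1) := by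
  rw [Bool.eq_iff_iff]
  simpa using h

-- B's loop invariant: the once-dict's keys are exactly the count-1 elements in
-- first-occurrence order, and the set holds exactly the repeated elements.
lemma pvB_inv (l : List Int) :
    (l.foldl (fun st item =>
      if PySem.Set.contains st.2 item then st
      else if st.1.contains item then (st.1.erase item, PySem.Set.add st.2 item)
      else (st.1.insert item (), st.2))
      ((PySem.Dict.empty : PySem.Dict Int Unit), (PySem.Set.empty : PySem.Set Int))).1.keys
      = (PySem.Set.ofList l).filter (fun k => l.count k == 1)
    ∧ ∀ y : Int,
      y ∈ (l.foldl (fun st item =>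
        if PySem.Set.contains st.2 item then st
        else if st.1.contains item then (st.1.erase item, PySem.Set.add st.2 item)
        else (st.1.insert item (), st.2))
        ((PySem.Dict.empty : PySem.Dict Int Unit), (PySem.Set.empty : PySem.Set Int))).2
      ↔ 1 < l.count y := by
  induction l using List.reverseRecOn with
  | nil =>
    constructor
    · rfl
    · intro y; simp [PySem.Set.empty, PySem.Dict.empty]
  | append_singleton l x ih =>
    obtain ⟨hkeys, hmore⟩ := ih
    rw [List.foldl_append] at *
    set st := l.foldl (fun st item =>
      if PySem.Set.contains st.2 item then st
      else if st.1.contains item then (st.1.erase item, PySem.Set.add st.2 item)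
      else (st.1.insert item (), st.2))
      ((PySem.Dict.empty : PySem.Dict Int Unit), (PySem.Set.empty : PySem.Set Int)) with hst
    have hofl : PySem.Set.ofList (l ++ [x]) = PySem.Set.add (PySem.Set.ofList l) x := by
      rw [PySem.Set.ofList_eq_foldl, PySem.Set.ofList_eq_foldl, List.foldl_append]
      rfl
    simp only [List.foldl_cons, List.foldl_nil]
    by_cases hmx : x ∈ st.2
    · -- x already seen more than once: the state is unchanged
      have hcx : 1 < l.count x := (hmore x).mp hmx
      have hxl : x ∈ l := List.count_pos_iff.mp (by omega)
      rw [if_pos ((PySem.Set.contains_iff st.2 x).mpr hmx)]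
      have hadd : PySem.Set.add (PySem.Set.ofList l) x = PySem.Set.ofList l := by
        have hc : PySem.Set.contains (PySem.Set.ofList l) x = true :=
          (PySem.Set.contains_iff _ x).mpr ((PySem.Set.mem_ofList l x).mpr hxl)
        simp [PySem.Set.add, hxl]
      constructor
      · rw [hofl, hadd, hkeys]
        apply List.filter_congr
        intro k _
        by_cases hk : k = x
        · subst hk
          rw [pv_count_app_self]
          exact pv_beq_one_congr (by omega)
        · rw [pv_count_app_ne l hk]
      · intro y
        rw [hmore y]
        by_cases hy : y = x
        · subst hy
          rw [pv_count_app_self]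
          omega
        · rw [pv_count_app_ne l hy]
    · rw [if_neg (fun h => hmx ((PySem.Set.contains_iff st.2 x).mp h))]
      by_cases honce : st.1.contains x = true
      · -- second occurrence of x: move it from the once-dict to the more-set
        have hxkeys : x ∈ st.1.keys := (PySem.Dict.contains_iff_mem_keys st.1 x).mp honce
        rw [hkeys] at hxkeys
        have hx1 : l.count x = 1 := by
          have := List.of_mem_filter hxkeys
          simpa using this
        have hxl : x ∈ l := List.count_pos_iff.mp (by omega)
        rw [if_pos honce]
        have hadd : PySem.Set.add (PySem.Set.ofList l) x = PySem.Set.ofList l := by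
          have hc : PySem.Set.contains (PySem.Set.ofList l) x = true :=
            (PySem.Set.contains_iff _ x).mpr ((PySem.Set.mem_ofList l x).mpr hxl)
          simp [PySem.Set.add, hxl]
        constructor
        · rw [pv_keys_erase, hkeys, hofl, hadd, List.filter_filter]
          apply List.filter_congr
          intro k _
          by_cases hk : k = x
          · subst hk
            rw [pv_count_app_self]
            simp [hx1]
          · rw [pv_count_app_ne l hk]
            simp [hk]
        · intro y
          rw [PySem.Set.mem_add, hmore y]
          by_cases hy : y = x
          · subst hy
            rw [pv_count_app_self, hx1]
            simp
          · rw [pv_count_app_ne l hy]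
            simp [hy]
      · -- first occurrence of x: append it to the once-dict
        have hnotl : x ∉ l := by
          intro hxl
          apply honce
          rw [PySem.Dict.contains_iff_mem_keys, hkeys]
          have hc1 : l.count x = 1 := by
            have h0 := List.count_pos_iff.mpr hxl
            have h2 : ¬ 1 < l.count x := fun h => hmx ((hmore x).mpr h)
            omega
          exact List.mem_filter.mpr ⟨(PySem.Set.mem_ofList l x).mpr hxl, by simp [hc1]⟩
        have hc0 : l.count x = 0 := List.count_eq_zero.mpr hnotl
        simp only [Bool.not_eq_true] at honce
        rw [if_neg (by simp [honce])]
        have hadd : PySem.Set.add (PySem.Set.ofList l) x = PySem.Set.ofList l ++ [x] := by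
          have hc : PySem.Set.contains (PySem.Set.ofList l) x = false := by
            rw [← Bool.not_eq_true, PySem.Set.contains_iff]
            rw [PySem.Set.mem_ofList]
            exact hnotl
          simp [PySem.Set.add, hnotl]
        constructor
        · rw [PySem.Dict.keys_insert_of_not_contains st.1 () honce, hkeys, hofl, hadd,
            List.filter_append]
          congr 1
          · apply List.filter_congr
            intro k hk
            have hkl : k ∈ l := (PySem.Set.mem_ofList l k).mp hk
            have hkx : k ≠ x := fun h => hnotl (h ▸ hkl)
            rw [pv_count_app_ne l hkx]
          · simp [hc0]
        · intro y
          rw [hmore y]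
          by_cases hy : y = x
          · subst hy
            rw [pv_count_app_self, hc0]
            simp
          · rw [pv_count_app_ne l hy]

-- ===== VERDICT (by name: the statement is the Claim_ definition above) =====
theorem remove_duplicates_and_add_sum_spec : Claim_equal_remove_duplicates_and_add_sum := by
  intro items _
  unfold Spec_remove_duplicates_and_add_sum
  unfold remove_duplicates_and_add_sum remove_duplicates_and_add_sum_alt
  simp only [pvA_dict_eq_counter, PySem.Dict.items_counter, pvA_collect, (pvB_inv items).1,
    List.nil_append, zero_add]
  rw [List.filter_map, List.map_map]
  have hpred : ((fun (kc : Int × Int) => kc.2 == 1) ∘ fun k => (k, (List.count k items : Int)))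
      = fun k => items.count k == 1 := by
    funext k
    simp [Function.comp]
  rw [hpred]
  simp [Function.comp_def]
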